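-- pv_equiv track=rewrite | github.com/Tikhovskoy/cosmic-cleanup | rocket_game.py | split_frames
-- ===== SOURCE A (Python) =====
-- def split_frames(f1, f2):
--     lines1, lines2 = f1.splitlines(), f2.splitlines()
--     diff = [i for i, (a, b) in enumerate(zip(lines1, lines2)) if a != b]
--     offset = min(diff)
--     static = "\n".join(lines1[:offset])
--     flame1 = "\n".join(lines1[offset:])
--     flame2 = "\n".join(lines2[offset:])
--     return static, flame1, flame2, offset
-- ===== SOURCE B (Python) =====
-- def split_frames(f1, f2):
--     lines1, lines2 = f1.splitlines(), f2.splitlines()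
--     for offset, (a, b) in enumerate(zip(lines1, lines2)):
--         if a != b:
--             break
--     else:
--         raise ValueError("frames have no differing line")
--     static = "\n".join(lines1[:offset])
--     flame1 = "\n".join(lines1[offset:])
--     flame2 = "\n".join(lines2[offset:])
--     return static, flame1, flame2, offset
-- ===== Notes on version B (the rewrite author's own statement) =====
-- stated objective: alternative
-- what changed: Replaces the full-scan list comprehension collecting every differing index plus min() with an early-exit loop that stops at the first differing line (for...else raising ValueError when no line differs, as A's min([]) does).
import Mathlib
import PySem

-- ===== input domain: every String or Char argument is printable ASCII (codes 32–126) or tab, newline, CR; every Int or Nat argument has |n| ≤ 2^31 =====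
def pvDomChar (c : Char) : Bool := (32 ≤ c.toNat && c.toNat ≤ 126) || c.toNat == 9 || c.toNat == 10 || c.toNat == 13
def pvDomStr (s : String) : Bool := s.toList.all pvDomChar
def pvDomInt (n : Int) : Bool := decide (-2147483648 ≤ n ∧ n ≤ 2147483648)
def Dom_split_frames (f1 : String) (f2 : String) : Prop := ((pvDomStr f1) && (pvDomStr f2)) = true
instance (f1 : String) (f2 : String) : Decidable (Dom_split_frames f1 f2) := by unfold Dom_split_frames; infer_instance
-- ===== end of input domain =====

-- B replaces A's full scan (collect every differing index, then min) by an early-exit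
-- search for the first differing line: a different decomposition (early exit, no index list).


-- ===== PORT A =====
def split_frames (f1 : String) (f2 : String) : String × String × String × Int :=
  let lines1 := PySem.Str.splitlines f1
  let lines2 := PySem.Str.splitlines f2
  let diff := ((PySem.List.enumerate (lines1.zip lines2) 0).filter
      (fun p => p.2.1 != p.2.2)).map (·.1)
  match PySem.List.min? diff (fun x => x) with
  | none => ("", "", "", 0)   -- min([]) raises ValueError; excluded by Pre_split_frames
  | some offset =>
    (PySem.Str.join "\n" (PySem.List.slice lines1 none (some offset)),
     PySem.Str.join "\n" (PySem.List.slice lines1 (some offset) none),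
     PySem.Str.join "\n" (PySem.List.slice lines2 (some offset) none),
     offset)

-- ===== PORT B =====
-- early-exit search for the first differing paired line (B's for…break loop)
def sfFirstDiff : List (String × String) → Int → Option Int
  | [], _ => none
  | (a, b) :: rest, i => if a != b then some i else sfFirstDiff rest (i + 1)

def split_frames_alt (f1 : String) (f2 : String) : String × String × String × Int :=
  let lines1 := PySem.Str.splitlines f1
  let lines2 := PySem.Str.splitlines f2
  match sfFirstDiff (lines1.zip lines2) 0 with
  | none => ("", "", "", 0)   -- for…else: raise ValueError; excluded by Pre_split_frames
  | some offset =>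
    (PySem.Str.join "\n" (PySem.List.slice lines1 none (some offset)),
     PySem.Str.join "\n" (PySem.List.slice lines1 (some offset) none),
     PySem.Str.join "\n" (PySem.List.slice lines2 (some offset) none),
     offset)

-- ===== PRECONDITION & SPEC =====
-- Pre_ excludes exactly the inputs with no differing paired line (identical or empty frames),
-- on which A's min([]) raises ValueError (and B raises ValueError too).
def Pre_split_frames (f1 : String) (f2 : String) : Prop :=
  ((PySem.Str.splitlines f1).zip (PySem.Str.splitlines f2)).any (fun p => p.1 != p.2) = true
instance (f1 : String) (f2 : String) : Decidable (Pre_split_frames f1 f2) := by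
  unfold Pre_split_frames; infer_instance
def pvWitness_split_frames : String × String := ("a\nx", "a\ny")

def Spec_split_frames (f1 : String) (f2 : String) (out : String × String × String × Int) : Prop := out = split_frames_alt f1 f2
instance (f1 : String) (f2 : String) (out : String × String × String × Int) : Decidable (Spec_split_frames f1 f2 out) := by unfold Spec_split_frames; infer_instance

-- ===== CLAIM (what is proved, stated in full; the proofs are below) =====
def Claim_equal_split_frames : Prop := ∀ (f1 : String) (f2 : String), Dom_split_frames f1 f2 → Pre_split_frames f1 f2 → Spec_split_frames f1 f2 (split_frames f1 f2)

-- ===== LEMMAS AND PROOFS =====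

theorem foldl_min_of_le (L : List Int) (a : Int) (h : ∀ x ∈ L, a ≤ x) :
    L.foldl min a = a := by
  induction L generalizing a with
  | nil => rfl
  | cons y t ih =>
    have hay : a ≤ y := h y (by simp)
    simp only [List.foldl_cons, min_eq_left hay]
    exact ih a (fun x hx => h x (by simp [hx]))

theorem min_filter_enumerate_eq_firstDiff (ps : List (String × String)) (s : Int) :
    PySem.List.min? (((PySem.List.enumerate ps s).filter
        (fun p => p.2.1 != p.2.2)).map (·.1)) (fun x => x) = sfFirstDiff ps s := by
  induction ps generalizing s with
  | nil => simp [PySem.List.enumerate_nil, sfFirstDiff, PySem.List.min?]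
  | cons hd t ih =>
    obtain ⟨a, b⟩ := hd
    rw [PySem.List.enumerate_cons]
    cases hab : (a != b) with
    | true =>
      -- head differs: min of s :: rest-indices is s, since rest indices ≥ s+1
      simp only [List.filter_cons, hab, if_pos, List.map_cons]
      rw [PySem.List.min?_id_cons]
      have hall : ∀ x ∈ ((PySem.List.enumerate t (s + 1)).filter
          (fun p => p.2.1 != p.2.2)).map (·.1), s ≤ x := by
        intro x hx
        simp only [List.mem_map, List.mem_filter] at hx
        obtain ⟨p, ⟨hpmem, _⟩, hpx⟩ := hx
        rw [PySem.List.mem_enumerate_iff] at hpmem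
        obtain ⟨k, hk, hpk⟩ := hpmem
        subst hpk; subst hpx
        simp; omega
      rw [foldl_min_of_le _ _ hall]
      simp [sfFirstDiff, hab]
    | false =>
      simp only [List.filter_cons, hab, Bool.false_eq_true, if_false]
      rw [ih]
      simp [sfFirstDiff, hab]

-- ===== VERDICT (by name: the statement is the Claim_ definition above) =====
theorem split_frames_spec : Claim_equal_split_frames := by
  intro f1 f2 _ _
  unfold Spec_split_frames
  simp only [split_frames, split_frames_alt, min_filter_enumerate_eq_firstDiff]
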